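-- pv_equiv track=rewrite | github.com/HabibEbrahimi2025/LeetCodePractice | DayStrik/DeleteCharacterToFancyString.py | fancyString
-- ===== SOURCE A (Python) =====
-- def fancyString(s):
--     if len(s)<2:
--         return s
--     i=0
--     result=[]
--     while i<len(s):
--         j=1
--         if i+1 < len(s) and s[i]==s[i+1]:
--             while i+1<len(s) and s[i]==s[i+1]:
--                 j+=1
--                 if j<=2:
--                     result.append(s[i])
--                     i+=1
--                 else:
--                     i+=1
--         if i<len(s):
--             result.append(s[i])
--             i+=1
--     return ''.join(result)
-- ===== SOURCE B (Python) =====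
-- from itertools import groupby
--
-- def fancyString(s):
--     return ''.join(c * min(2, sum(1 for _ in g)) for c, g in groupby(s))
-- ===== Notes on version B (the rewrite author's own statement) =====
-- stated objective: idiomatic
-- what changed: Replaces A's index-based while-loop with a nested run-counting loop by an itertools.groupby decomposition: split into maximal runs and rebuild each run capped at two characters.
import Mathlib
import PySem

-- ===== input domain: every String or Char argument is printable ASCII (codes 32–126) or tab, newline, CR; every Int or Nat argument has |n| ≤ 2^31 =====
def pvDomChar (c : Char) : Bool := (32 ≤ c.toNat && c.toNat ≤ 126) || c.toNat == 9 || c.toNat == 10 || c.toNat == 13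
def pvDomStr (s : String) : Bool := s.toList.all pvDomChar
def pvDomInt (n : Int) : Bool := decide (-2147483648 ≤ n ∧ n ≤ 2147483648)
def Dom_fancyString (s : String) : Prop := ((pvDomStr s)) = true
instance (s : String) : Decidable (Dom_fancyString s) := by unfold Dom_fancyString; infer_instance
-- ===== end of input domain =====

-- B replaces A's index/run-counter while-loop by a group-then-rebuild decomposition (idiomatic groupby style); same O(n) cost.

-- ===== PORT A =====
-- A's inner 'while i+1<len(s) and s[i]==s[i+1]' loop: j counts the run, appends while j<=2.
-- Python indexing s[i] is exact here: every access made by A is with 0 ≤ i < len(s).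
-- The while loops are encoded with a fuel argument (≥ the remaining length, so never exhausted).
def pvInnerA (cs : List Char) : Nat → Nat → Nat → List Char → Nat × List Char
  | 0, i, _, res => (i, res)
  | fuel+1, i, j, res =>
    if i + 1 < cs.length ∧ cs[i]! = cs[i+1]! then
      if j + 1 ≤ 2 then pvInnerA cs fuel (i+1) (j+1) (res ++ [cs[i]!])
      else pvInnerA cs fuel (i+1) (j+1) res
    else (i, res)

-- A's 'j=1; if i+1<len(s) and s[i]==s[i+1]: <inner while loop>' step: the updated (i, result).
def pvStep (cs : List Char) (i : Nat) (res : List Char) : Nat × List Char :=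
  if i + 1 < cs.length ∧ cs[i]! = cs[i+1]! then pvInnerA cs cs.length i 1 res else (i, res)

-- A's outer 'while i<len(s)' loop.
def pvOuterA (cs : List Char) : Nat → Nat → List Char → List Char
  | 0, _, res => res
  | fuel+1, i, res =>
    if i < cs.length then
      let p := pvStep cs i res
      if p.1 < cs.length then pvOuterA cs fuel (p.1 + 1) (p.2 ++ [cs[p.1]!]) else p.2
    else res

def fancyString (s : String) : String :=
  if PySem.Str.len s < 2 then s
  else String.ofList (pvOuterA s.toList s.toList.length 0 [])

-- ===== PORT B =====
-- itertools.groupby ported by hand as a structural grouping into (char, run-length) pairs (exact for this use).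
def pvGroups : List Char → List (Char × Nat)
  | [] => []
  | c :: rest =>
    match pvGroups rest with
    | [] => [(c, 1)]
    | (d, k) :: gs => if c = d then (c, k+1) :: gs else (c, 1) :: (d, k) :: gs

def fancyString_alt (s : String) : String :=
  String.ofList ((pvGroups s.toList).flatMap (fun p => List.replicate (min 2 p.2) p.1))

-- ===== PRECONDITION & SPEC =====
def Spec_fancyString (s : String) (out : String) : Prop := out = fancyString_alt s
instance (s : String) (out : String) : Decidable (Spec_fancyString s out) := by unfold Spec_fancyString; infer_instance

-- ===== CLAIM (what is proved, stated in full; the proofs are below) =====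
def Claim_equal_fancyString : Prop := ∀ (s : String), Dom_fancyString s → Spec_fancyString s (fancyString s)

-- ===== LEMMAS AND PROOFS =====

-- abbreviation used only in the proofs
def pvFancyL (l : List Char) : List Char :=
  (pvGroups l).flatMap (fun p => List.replicate (min 2 p.2) p.1)

theorem pvGroups_head (c : Char) (rest : List Char) :
    ∃ k gs, pvGroups (c :: rest) = (c, k) :: gs := by
  cases h : pvGroups rest with
  | nil => exact ⟨1, [], by simp [pvGroups, h]⟩
  | cons p gs =>
    obtain ⟨d, k⟩ := p
    by_cases hc : c = d
    · subst hc; exact ⟨k + 1, gs, by simp [pvGroups, h]⟩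
    · exact ⟨1, (d, k) :: gs, by simp [pvGroups, h, hc]⟩

theorem pvGroups_cons (c : Char) (rest : List Char) :
    pvGroups (c :: rest) = (match pvGroups rest with
      | [] => [(c, 1)]
      | (d, k) :: gs => if c = d then (c, k+1) :: gs else (c, 1) :: (d, k) :: gs) := rfl

theorem pvGroups_run (k : Nat) (c : Char) (t : List Char) (ht : t.head? ≠ some c) :
    pvGroups (List.replicate (k+1) c ++ t) = (c, k+1) :: pvGroups t := by
  induction k with
  | zero =>
    cases t with
    | nil => simp [pvGroups]
    | cons d t' =>
      have hcd : c ≠ d := by simpa using fun h => ht (by simp [h])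
      obtain ⟨k', gs, hg⟩ := pvGroups_head d t'
      rw [List.replicate_one, List.cons_append, List.nil_append, pvGroups_cons, hg]
      simp [hcd]
  | succ m ih =>
    have : List.replicate (m+2) c ++ t = c :: (List.replicate (m+1) c ++ t) := by
      simp [List.replicate_succ]
    rw [this, pvGroups_cons, ih]
    simp

theorem pvFancyL_run (k : Nat) (c : Char) (t : List Char) (ht : t.head? ≠ some c) :
    pvFancyL (List.replicate (k+1) c ++ t)
      = List.replicate (min 2 (k+1)) c ++ pvFancyL t := by
  simp [pvFancyL, pvGroups_run k c t ht]

theorem pvDrop_cons {cs : List Char} {i : Nat} {a : Char} {l : List Char}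
    (h : cs.drop i = a :: l) :
    i < cs.length ∧ cs[i]! = a ∧ cs.drop (i+1) = l := by
  have hlen : i < cs.length := by
    by_contra hc
    have : cs.drop i = [] := List.drop_eq_nil_iff.mpr (by omega)
    simp [this] at h
  have hget : cs[i]? = some a := by rw [← List.head?_drop, h]; rfl
  refine ⟨hlen, by simp [List.getElem!_eq_getElem?_getD, hget], ?_⟩
  have : cs.drop (i+1) = (cs.drop i).drop 1 := by rw [List.drop_drop]
  rw [this, h]; rfl

theorem pvDrop_repl (a : Nat) : ∀ (cs : List Char) (i b : Nat) (c : Char) (t : List Char),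
    cs.drop i = List.replicate (a + b) c ++ t → cs.drop (i + a) = List.replicate b c ++ t := by
  induction a with
  | zero => intro cs i b c t h; simpa using h
  | succ m ih =>
    intro cs i b c t h
    have h' : cs.drop i = c :: (List.replicate (m + b) c ++ t) := by
      rw [h]; simp [show m + 1 + b = (m + b) + 1 by omega, List.replicate_succ]
    obtain ⟨-, -, h1⟩ := pvDrop_cons h'
    have := ih cs (i+1) b c t h1
    simpa [show i + (m + 1) = i + 1 + m by omega] using this

theorem pvInner_skip (m : Nat) : ∀ (fuel : Nat) (cs : List Char) (i : Nat) (res : List Char)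
    (c : Char) (t : List Char) (j : Nat), m ≤ fuel → 2 ≤ j →
    cs.drop i = List.replicate (m+1) c ++ t → t.head? ≠ some c →
    pvInnerA cs fuel i j res = (i + m, res) := by
  induction m with
  | zero =>
    intro fuel cs i res c t j _ hj hd ht
    obtain ⟨hi, hci, hd1⟩ := pvDrop_cons (by simpa using hd)
    have hguard : ¬ (i + 1 < cs.length ∧ cs[i]! = cs[i+1]!) := by
      rintro ⟨h1, h2⟩
      cases htl : t with
      | nil => rw [htl] at hd1; have := List.drop_eq_nil_iff.mp hd1; omega
      | cons b t'' =>
        rw [htl] at hd1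
        obtain ⟨-, hci1, -⟩ := pvDrop_cons hd1
        rw [hci, hci1] at h2
        exact ht (by rw [htl, ← h2]; rfl)
    cases fuel with
    | zero => simp [pvInnerA]
    | succ f => rw [pvInnerA, if_neg hguard]; simp
  | succ m ih =>
    intro fuel cs i res c t j hm hj hd ht
    have hd' : cs.drop i = c :: (List.replicate (m+1) c ++ t) := by
      rw [hd]; simp [List.replicate_succ]
    obtain ⟨hi, hci, hd1⟩ := pvDrop_cons hd'
    obtain ⟨hi1, hci1, -⟩ := pvDrop_cons (show cs.drop (i+1) = c :: (List.replicate m c ++ t) by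
      rw [hd1]; simp [List.replicate_succ])
    cases fuel with
    | zero => omega
    | succ f =>
      rw [pvInnerA, if_pos ⟨hi1, by rw [hci, hci1]⟩, if_neg (by omega)]
      rw [ih f cs (i+1) res c t (j+1) (by omega) (by omega) hd1 ht]
      congr 1
      omega

theorem pvRun_decomp (c : Char) (l : List Char) :
    ∃ k t, c :: l = List.replicate (k+1) c ++ t ∧ t.head? ≠ some c := by
  induction l generalizing c with
  | nil => exact ⟨0, [], by simp, by simp⟩
  | cons b l' ih =>
    by_cases hb : b = c
    · subst hb
      obtain ⟨k, t, heq, ht⟩ := ih b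
      exact ⟨k + 1, t, by rw [List.replicate_succ, List.cons_append, ← heq], ht⟩
    · exact ⟨0, b :: l', by simp, by simpa using fun h => hb h⟩

theorem pvOuter_eq (cs : List Char) :
    ∀ fuel i res, cs.length - i ≤ fuel → pvOuterA cs fuel i res = res ++ pvFancyL (cs.drop i) := by
  intro fuel
  induction fuel with
  | zero =>
    intro i res hn
    rw [pvOuterA]
    rw [List.drop_eq_nil_iff.mpr (by omega)]
    simp [pvFancyL, pvGroups]
  | succ n ih =>
    intro i res hn
    by_cases hi : i < cs.length
    · cases hdrop : cs.drop i with
      | nil => have := List.drop_eq_nil_iff.mp hdrop; omega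
      | cons c l =>
        obtain ⟨k, t, hdec, ht⟩ := pvRun_decomp c l
        have hd' : cs.drop i = List.replicate (k+1) c ++ t := by rw [hdrop, hdec]
        cases k with
        | zero =>
          -- run of length 1: the inner-loop guard is false
          obtain ⟨-, hci, hd1⟩ := pvDrop_cons (show cs.drop i = c :: t by simpa using hd')
          have hguard : ¬ (i + 1 < cs.length ∧ cs[i]! = cs[i+1]!) := by
            rintro ⟨h1, h2⟩
            cases htl : t with
            | nil => rw [htl] at hd1; have := List.drop_eq_nil_iff.mp hd1; omega
            | cons b t'' =>
              rw [htl] at hd1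
              obtain ⟨-, hci1, -⟩ := pvDrop_cons hd1
              rw [hci, hci1] at h2
              exact ht (by rw [htl, ← h2]; rfl)
          rw [pvOuterA, if_pos hi]
          simp only [pvStep, if_neg hguard, if_pos hi]
          rw [ih (i+1) (res ++ [cs[i]!]) (by omega), hd1, hci]
          rw [hdec, pvFancyL_run 0 c t ht]
          simp
        | succ k' =>
          -- run of length ≥ 2: one unfolding of the inner loop, then pvInner_skip
          obtain ⟨-, hci, hd1⟩ := pvDrop_cons (show cs.drop i = c :: (List.replicate (k'+1) c ++ t) by
            rw [hd']; simp [List.replicate_succ])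
          obtain ⟨hi1, hci1, -⟩ := pvDrop_cons (show cs.drop (i+1) = c :: (List.replicate k' c ++ t) by
            rw [hd1]; simp [List.replicate_succ])
          have hlen : i + 1 + k' + 1 ≤ cs.length := by
            have h1 : (cs.drop (i+1)).length = cs.length - (i+1) := List.length_drop ..
            rw [hd1] at h1
            simp at h1
            omega
          have hinner : pvInnerA cs cs.length i 1 res = (i + 1 + k', res ++ [c]) := by
            obtain ⟨f, hf⟩ : ∃ f, cs.length = f + 1 := ⟨cs.length - 1, by omega⟩
            rw [hf, pvInnerA, if_pos ⟨hi1, by rw [hci, hci1]⟩, if_pos (by omega)]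
            rw [hci, pvInner_skip k' f cs (i+1) (res ++ [c]) c t 2 (by omega) (by omega) hd1 ht]
          have hstep : pvStep cs i res = (i + 1 + k', res ++ [c]) := by
            rw [pvStep, if_pos ⟨hi1, by rw [hci, hci1]⟩, hinner]
          have hd2 : cs.drop (i + 1 + k') = c :: t := by
            have := pvDrop_repl (k' + 1) cs i 1 c t hd'
            simpa [show i + (k' + 1) = i + 1 + k' by omega] using this
          obtain ⟨hi2, hci2, hd3⟩ := pvDrop_cons hd2
          rw [pvOuterA, if_pos hi]
          simp only [hstep, if_pos hi2]
          rw [hci2, ih (i + 1 + k' + 1) (res ++ [c] ++ [c]) (by omega), hd3]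
          rw [hdec, pvFancyL_run (k'+1) c t ht]
          simp [List.replicate_succ]
    · cases hn' : (cs.length - i) with
      | zero =>
        rw [pvOuterA, if_neg hi]
        rw [List.drop_eq_nil_iff.mpr (by omega)]
        simp [pvFancyL, pvGroups]
      | succ => omega

theorem pvMain (l : List Char) : pvOuterA l l.length 0 [] = pvFancyL l := by
  have := pvOuter_eq l l.length 0 [] (by omega)
  simpa using this

theorem pvShort (l : List Char) (h : l.length < 2) : pvFancyL l = l := by
  match l, h with
  | [], _ => rfl
  | [c], _ => simp [pvFancyL, pvGroups]

-- ===== VERDICT (by name: the statement is the Claim_ definition above) =====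
theorem fancyString_spec : Claim_equal_fancyString := by
  intro s _
  unfold Spec_fancyString fancyString fancyString_alt
  split_ifs with h
  · rw [← pvFancyL]
    rw [pvShort s.toList (by have := PySem.Str.len_eq s; omega)]
    exact String.ofList_toList.symm
  · rw [pvMain, pvFancyL]
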